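-- pv_equiv track=rewrite | github.com/bit-shift/resty-notes | helpers/__init__.py | find_fuzzy_matches
-- ===== SOURCE A (Python) =====
-- def find_fuzzy_matches(fragment, strings, case_sensitive=False):
--     """find_fuzzy_matches(fragment, [string], case_sensitive=False) -> [string]
--
-- Given a list of strings, return a list of those where the non-empty
-- fragment has all its characters appear in order. If case_sensitive is
-- False (default), uppercase characters will match lowercase versions,
-- and vice versa."""
--     if len(fragment) == 0:
--         return strings
--     matches = []
--     for string in strings:
--         fragment_index = 0
--         for char in string:
--             if (case_sensitive and char == fragment[fragment_index]) or ((not case_sensitive) and char.lower() == fragment[fragment_index].lower()):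
--                 fragment_index += 1
--             if fragment_index == len(fragment): # all chars existed in order, this is a fuzzy match
--                 matches.append(string)
--                 break
--     return matches
-- ===== SOURCE B (Python) =====
-- def find_fuzzy_matches(fragment, strings, case_sensitive=False):
--     """Subsequence test via a per-string index mapping each character to its
--     list of positions; the fragment is matched by jumping through position
--     lists instead of scanning the string character by character."""
--     if len(fragment) == 0:
--         return strings
--     frag = fragment if case_sensitive else fragment.lower()
--
--     def matches(string):
--         s = string if case_sensitive else string.lower()
--         positions = {}
--         for i, ch in enumerate(s):
--             positions.setdefault(ch, []).append(i)
--         prev = -1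
--         for ch in frag:
--             later = [p for p in positions.get(ch, []) if p > prev]
--             if not later:
--                 return False
--             prev = later[0]
--         return True
--
--     return [string for string in strings if matches(string)]
-- ===== Notes on version B (the rewrite author's own statement) =====
-- stated objective: alternative
-- what changed: B builds, per string, a dictionary mapping each character to its ascending list of positions and then matches the fragment by jumping through those position lists (first position after the previous match), instead of A's single left-to-right scan of the string with a fragment index counter.
import Mathlib
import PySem

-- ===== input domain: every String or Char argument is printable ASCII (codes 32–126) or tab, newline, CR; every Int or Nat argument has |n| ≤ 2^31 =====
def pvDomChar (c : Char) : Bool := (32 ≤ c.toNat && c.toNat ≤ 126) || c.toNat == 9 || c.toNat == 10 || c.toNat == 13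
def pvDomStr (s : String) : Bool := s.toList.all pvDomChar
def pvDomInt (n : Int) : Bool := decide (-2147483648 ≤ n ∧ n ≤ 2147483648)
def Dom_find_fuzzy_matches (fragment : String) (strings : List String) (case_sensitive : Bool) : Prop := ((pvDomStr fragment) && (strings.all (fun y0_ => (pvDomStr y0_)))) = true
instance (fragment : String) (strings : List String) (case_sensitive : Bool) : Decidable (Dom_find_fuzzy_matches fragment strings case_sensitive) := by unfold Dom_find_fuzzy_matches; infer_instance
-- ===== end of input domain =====

-- B replaces A's left-to-right scan with a per-string index: a dictionary from character to its
-- list of positions, walked fragment-wise (alternative algorithm; same answers).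

-- ===== PORT A =====
-- the per-character test of A's inner `if`
def pvMatchA (case_sensitive : Bool) (c d : Char) : Bool :=
  (case_sensitive && (c == d)) || (!case_sensitive && (PySem.Chars.lowerChar c == PySem.Chars.lowerChar d))

-- A's inner `for char in string` loop with state fragment_index; `true` = the break/append fired.
-- `fragment[fragment_index]`: the loop breaks as soon as the index reaches len(fragment), so the
-- access is always in range and `getD … ' '` never uses its default.
def pvLoopA (case_sensitive : Bool) (frag : List Char) (i : Nat) : List Char → Bool
  | [] => false
  | c :: rest =>
    let i' := if pvMatchA case_sensitive c (frag.getD i ' ') then i + 1 else i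
    if i' == frag.length then true else pvLoopA case_sensitive frag i' rest

def find_fuzzy_matches (fragment : String) (strings : List String) (case_sensitive : Bool) : List String :=
  if fragment.length == 0 then strings
  else strings.foldl
    (fun acc s => if pvLoopA case_sensitive fragment.toList 0 s.toList then acc ++ [s] else acc)  -- matches.append(string)
    []

-- ===== PORT B =====
-- for i, ch in enumerate(s): positions.setdefault(ch, []).append(i)
def pvBuildPos (s : List Char) : PySem.Dict Char (List Int) :=
  (PySem.List.enumerate s 0).foldl (fun d p => d.modify p.2 [] (· ++ [p.1])) PySem.Dict.empty

-- B's `for ch in frag` loop: `later = [p for p in positions.get(ch, []) if p > prev]`,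
-- fail on empty, else continue with prev = later[0]
def pvWalk (pos : PySem.Dict Char (List Int)) : List Char → Int → Bool
  | [], _ => true
  | c :: cs, prev =>
    match (pos.getD c []).filter (fun p => decide (prev < p)) with
    | [] => false
    | j :: _ => pvWalk pos cs j

def find_fuzzy_matches_alt (fragment : String) (strings : List String) (case_sensitive : Bool) : List String :=
  if fragment.length == 0 then strings
  else
    let frag := (if case_sensitive then fragment else PySem.Str.lower fragment).toList
    strings.filter (fun string =>
      let s := (if case_sensitive then string else PySem.Str.lower string).toList
      pvWalk (pvBuildPos s) frag (-1))

-- ===== PRECONDITION & SPEC =====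
def Spec_find_fuzzy_matches (fragment : String) (strings : List String) (case_sensitive : Bool) (out : List String) : Prop := out = find_fuzzy_matches_alt fragment strings case_sensitive
instance (fragment : String) (strings : List String) (case_sensitive : Bool) (out : List String) : Decidable (Spec_find_fuzzy_matches fragment strings case_sensitive out) := by unfold Spec_find_fuzzy_matches; infer_instance

-- ===== CLAIM (what is proved, stated in full; the proofs are below) =====
def Claim_equal_find_fuzzy_matches : Prop := ∀ (fragment : String) (strings : List String) (case_sensitive : Bool), Dom_find_fuzzy_matches fragment strings case_sensitive → Spec_find_fuzzy_matches fragment strings case_sensitive (find_fuzzy_matches fragment strings case_sensitive)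

-- ===== LEMMAS AND PROOFS =====

-- proof-side intermediate: the plain greedy subsequence test both ports are reduced to
def pvConsume (c : Char) : List Char → Option (List Char)
  | [] => none
  | d :: rest => if c == d then some rest else pvConsume c rest

def pvIsSubseq : List Char → List Char → Bool
  | [], _ => true
  | c :: cs, s =>
    match pvConsume c s with
    | none => false
    | some rest => pvIsSubseq cs rest

-- the normalization B applies once to each character
def pvNorm (case_sensitive : Bool) (c : Char) : Char :=
  if case_sensitive then c else PySem.Chars.lowerChar c

theorem pvMatchA_eq_norm (cs : Bool) (c d : Char) :
    pvMatchA cs c d = (pvNorm cs c == pvNorm cs d) := by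
  cases cs <;> simp [pvMatchA, pvNorm]

theorem pvIsSubseq_nil (l : List Char) (h : l ≠ []) : pvIsSubseq l [] = false := by
  cases l with
  | nil => exact absurd rfl h
  | cons a l => simp [pvIsSubseq, pvConsume]

theorem pvIsSubseq_cons_cons (a b : Char) (l m : List Char) :
    pvIsSubseq (a :: l) (b :: m) =
      if a == b then pvIsSubseq l m else pvIsSubseq (a :: l) m := by
  by_cases hab : (a == b) = true
  · simp [pvIsSubseq, pvConsume, hab]
  · simp only [Bool.not_eq_true] at hab
    simp [pvIsSubseq, pvConsume, hab]

-- ===== A-side reduction: A's index loop is the greedy test on normalized characters =====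
theorem pvLoopA_eq_isSubseq (cs : Bool) (frag : List Char) :
    ∀ (s : List Char) (i : Nat), i < frag.length →
      pvLoopA cs frag i s = pvIsSubseq ((frag.drop i).map (pvNorm cs)) (s.map (pvNorm cs)) := by
  intro s
  induction s with
  | nil =>
    intro i hi
    have hne : (frag.drop i).map (pvNorm cs) ≠ [] := by
      simp [List.drop_eq_nil_iff]
      omega
    rw [List.map_nil, pvIsSubseq_nil _ hne]
    rfl
  | cons c rest ih =>
    intro i hi
    have hgd : frag.getD i ' ' = frag[i] := List.getD_eq_getElem frag ' ' hi
    have hr : (frag.drop i).map (pvNorm cs)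
        = pvNorm cs frag[i] :: (frag.drop (i + 1)).map (pvNorm cs) := by
      rw [List.drop_eq_getElem_cons hi, List.map_cons]
    have hstep : pvLoopA cs frag i (c :: rest)
        = if (if pvMatchA cs c (frag.getD i ' ') then i + 1 else i) == frag.length then true
          else pvLoopA cs frag (if pvMatchA cs c (frag.getD i ' ') then i + 1 else i) rest := rfl
    rw [hstep, hgd, List.map_cons, hr, pvIsSubseq_cons_cons]
    have hcomm : (pvNorm cs frag[i] == pvNorm cs c) = (pvNorm cs c == pvNorm cs frag[i]) :=
      Bool.beq_comm
    by_cases h : pvMatchA cs c frag[i] = true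
    · have hb : (pvNorm cs frag[i] == pvNorm cs c) = true := by
        rw [hcomm, ← pvMatchA_eq_norm]; exact h
      rw [if_pos h, if_pos hb]
      by_cases hlen : i + 1 = frag.length
      · simp [hlen, pvIsSubseq]
      · have hi' : i + 1 < frag.length := lt_of_le_of_ne hi fun he => hlen he
        have hfalse : ((i + 1 : Nat) == frag.length) = false := by simp [hlen]
        rw [hfalse, if_neg (by simp)]
        exact ih (i + 1) hi'
    · have hb : (pvNorm cs frag[i] == pvNorm cs c) = false := by
        rw [hcomm, ← pvMatchA_eq_norm]
        exact Bool.not_eq_true _ ▸ (by simpa using h)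
      rw [if_neg h, if_neg (by simp [Nat.ne_of_lt hi]), hb, if_neg (by simp)]
      rw [ih i hi, hr]

theorem pvMap_norm (cs : Bool) (s : String) :
    ((if cs then s else PySem.Str.lower s).toList) = s.toList.map (pvNorm cs) := by
  cases cs
  · simp [pvNorm, PySem.Chars.lower]
  · show s.toList = s.toList.map (pvNorm true)
    rw [show pvNorm true = id from rfl, List.map_id]

-- ===== B-side reduction: the position-index walk is the greedy test =====

-- positions (as produced by enumerate with start t) of character c in l, ascending
def pvOccT (l : List Char) (t : Int) (c : Char) : List Int :=
  ((PySem.List.enumerate l t).filter (fun p => p.2 == c)).map (·.1)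

theorem pvOccT_nil (t : Int) (c : Char) : pvOccT [] t c = [] := rfl

theorem pvOccT_cons (d : Char) (l : List Char) (t : Int) (c : Char) :
    pvOccT (d :: l) t c = if d == c then t :: pvOccT l (t + 1) c else pvOccT l (t + 1) c := by
  by_cases h : (d == c) = true <;>
    simp [pvOccT, PySem.List.enumerate_cons, h]

theorem pvOccT_ge (l : List Char) (t : Int) (c : Char) :
    ∀ p ∈ pvOccT l t c, t ≤ p := by
  induction l generalizing t with
  | nil => intro p hp; simp [pvOccT_nil] at hp
  | cons d l ih =>
    intro p hp
    rw [pvOccT_cons] at hp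
    by_cases h : (d == c) = true
    · rw [if_pos h] at hp
      rcases List.mem_cons.mp hp with h1 | h2
      · omega
      · have := ih (t + 1) p h2; omega
    · rw [if_neg h] at hp
      have := ih (t + 1) p hp; omega

-- the dictionary lookup is exactly the position list
theorem pvBuildPos_getD (s : List Char) (c : Char) :
    (pvBuildPos s).getD c [] = pvOccT s 0 c := by
  unfold pvBuildPos pvOccT
  have h : (PySem.List.enumerate s 0).foldl (fun d p => d.modify p.2 [] (· ++ [p.1]))
        PySem.Dict.empty
      = ((PySem.List.enumerate s 0).map Prod.swap).foldl
        (fun d (q : Char × Int) => d.modify q.1 [] (· ++ [q.2])) PySem.Dict.empty := by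
    rw [List.foldl_map]
    rfl
  rw [h, PySem.Dict.getD_foldl_modify_append]
  simp [List.filter_map, List.map_map, Function.comp_def, Prod.swap]

-- filtering the position list past k-1 = the position list of the dropped suffix
theorem pvOccT_filter_drop (c : Char) :
    ∀ (l : List Char) (t : Int) (k : Nat),
      (pvOccT l t c).filter (fun p => decide (t + (k : Int) ≤ p)) = pvOccT (l.drop k) (t + k) c := by
  intro l
  induction l with
  | nil => intro t k; simp [pvOccT_nil]
  | cons d l ih =>
    intro t k
    cases k with
    | zero =>
      simp only [Nat.cast_zero, add_zero, List.drop_zero]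
      exact List.filter_eq_self.mpr (fun p hp => by
        simpa using pvOccT_ge (d :: l) t c p hp)
    | succ k' =>
      rw [pvOccT_cons, List.drop_succ_cons]
      have hkey : ∀ (m : List Int), (t :: m).filter (fun p => decide (t + ((k' + 1 : Nat) : Int) ≤ p))
          = m.filter (fun p => decide (t + ((k' + 1 : Nat) : Int) ≤ p)) := by
        intro m
        have hlt : (decide (t + ((k' + 1 : Nat) : Int) ≤ t)) = false := by
          simp only [decide_eq_false_iff_not]
          push_cast
          omega
        rw [List.filter_cons, hlt]
        simp
      have harg : (fun p => decide (t + ((k' + 1 : Nat) : Int) ≤ p))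
          = (fun p => decide ((t + 1) + (k' : Int) ≤ p)) := by
        funext p; simp only [decide_eq_decide]; push_cast; omega
      by_cases h : (d == c) = true
      · rw [if_pos h, hkey, harg, ih (t + 1) k']
        congr 1
        push_cast; omega
      · rw [if_neg h, harg, ih (t + 1) k']
        congr 1
        push_cast; omega

-- the head of the position list is where pvConsume lands
theorem pvOccT_consume (c : Char) :
    ∀ (l : List Char) (t : Nat),
      (pvOccT l (t : Int) c = [] ∧ pvConsume c l = none) ∨
      (∃ (m : Nat) (rest : List Int), t ≤ m ∧ pvOccT l (t : Int) c = (m : Int) :: rest ∧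
        pvConsume c l = some (l.drop (m - t + 1))) := by
  intro l
  induction l with
  | nil => intro t; left; exact ⟨rfl, rfl⟩
  | cons d l ih =>
    intro t
    by_cases h : (d == c) = true
    · right
      have hcd : (c == d) = true := by rw [beq_iff_eq] at h ⊢; exact h.symm
      refine ⟨t, pvOccT l ((t : Int) + 1) c, le_refl t, ?_, ?_⟩
      · rw [pvOccT_cons, if_pos h]
      · simp [pvConsume, hcd]
    · have hcd : (c == d) = false := by
        simp only [Bool.not_eq_true, beq_eq_false_iff_ne] at h ⊢
        exact fun e => h e.symm
      have hocc : pvOccT (d :: l) (t : Int) c = pvOccT l ((t : Int) + 1) c := by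
        rw [pvOccT_cons, if_neg h]
      have hcons : pvConsume c (d :: l) = pvConsume c l := by simp [pvConsume, hcd]
      have hcast : (((t + 1 : Nat)) : Int) = (t : Int) + 1 := by push_cast; ring
      rcases ih (t + 1) with ⟨h1, h2⟩ | ⟨m, rest, hm, h1, h2⟩
      · left
        rw [hcast] at h1
        exact ⟨hocc.trans h1, hcons.trans h2⟩
      · right
        rw [hcast] at h1
        refine ⟨m, rest, by omega, hocc.trans h1, ?_⟩
        rw [hcons, h2]
        have he : m - t + 1 = (m - (t + 1) + 1) + 1 := by omega
        rw [he, List.drop_succ_cons]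

-- the walk over the index equals the greedy test on the dropped suffix
theorem pvWalk_eq_isSubseq (s : List Char) :
    ∀ (frag : List Char) (k : Nat),
      pvWalk (pvBuildPos s) frag ((k : Int) - 1) = pvIsSubseq frag (s.drop k) := by
  intro frag
  induction frag with
  | nil => intro k; rfl
  | cons c cs ih =>
    intro k
    have hfilter : ((pvBuildPos s).getD c []).filter (fun p => decide ((k : Int) - 1 < p))
        = pvOccT (s.drop k) ((0 : Int) + k) c := by
      rw [pvBuildPos_getD]
      rw [show (fun p => decide ((k : Int) - 1 < p)) = (fun p => decide ((0 : Int) + (k : Int) ≤ p))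
            from funext fun p => by simp only [decide_eq_decide]; omega]
      exact pvOccT_filter_drop c s 0 k
    have hstep : pvWalk (pvBuildPos s) (c :: cs) ((k : Int) - 1)
        = match ((pvBuildPos s).getD c []).filter (fun p => decide ((k : Int) - 1 < p)) with
          | [] => false
          | j :: _ => pvWalk (pvBuildPos s) cs j := rfl
    rw [hstep, hfilter]
    have h0k : ((0 : Int) + k) = ((k : Nat) : Int) := by omega
    rw [h0k]
    rcases pvOccT_consume c (s.drop k) k with ⟨h1, h2⟩ | ⟨m, rest, hm, h1, h2⟩
    · rw [h1]
      simp [pvIsSubseq, h2]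
    · rw [h1]
      have hD : (s.drop k).drop (m - k + 1) = s.drop (m + 1) := by
        rw [List.drop_drop]
        congr 1
        omega
      have hRHS : pvIsSubseq (c :: cs) (s.drop k) = pvIsSubseq cs (s.drop (m + 1)) := by
        simp [pvIsSubseq, h2, hD]
      rw [hRHS]
      have hmcast : ((m : Nat) : Int) = (((m + 1 : Nat)) : Int) - 1 := by push_cast; ring
      rw [show (match ((m : Nat) : Int) :: rest with
                | [] => false
                | j :: _ => pvWalk (pvBuildPos s) cs j) = pvWalk (pvBuildPos s) cs ((m : Nat) : Int)
            from rfl,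
          hmcast, ih (m + 1)]

-- ===== VERDICT (by name: the statement is the Claim_ definition above) =====
theorem find_fuzzy_matches_spec : Claim_equal_find_fuzzy_matches := by
  intro fragment strings cs _
  unfold Spec_find_fuzzy_matches find_fuzzy_matches find_fuzzy_matches_alt
  by_cases h0 : fragment.length = 0
  · simp [h0]
  · have hpos : 0 < fragment.toList.length := by
      rw [← String.length]
      omega
    simp only [h0, beq_iff_eq, if_false]
    rw [PySem.List.foldl_append_if_eq_filter]
    simp only [List.nil_append]
    apply List.filter_congr
    intro s _
    rw [pvLoopA_eq_isSubseq cs fragment.toList s.toList 0 hpos, List.drop_zero,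
        pvMap_norm, pvMap_norm]
    have := pvWalk_eq_isSubseq (s.toList.map (pvNorm cs)) (fragment.toList.map (pvNorm cs)) 0
    simp only [Nat.cast_zero, List.drop_zero] at this
    rw [show ((0 : Int) - 1) = (-1 : Int) from rfl] at this
    exact this.symm
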